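-- pv_equiv track=rewrite | github.com/lfenzo/ia-clusterizacao | single_link.py | __sanitize_predictions
-- ===== SOURCE A (Python) =====
-- def __sanitize_predictions(pred) -> list:
--
--     matching = {}
--     original_pred_labels = sorted(set(pred))
--
--     for idx, label in enumerate(original_pred_labels):
--         matching[label] = idx
--
--     for i in range(len(pred)):
--         pred[i] = matching[ pred[i] ]
--
--     return pred
-- ===== SOURCE B (Python) =====
-- def __sanitize_predictions(pred) -> list:
--     # sort, compress adjacent duplicates, then binary-search each element's rank;
--     # no set() and no mapping dict. Mutates pred in place.
--     labels = sorted(pred)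
--     uniq = []
--     for x in labels:
--         if not uniq or uniq[-1] != x:
--             uniq.append(x)
--     for i in range(len(pred)):
--         v = pred[i]
--         lo, hi = 0, len(uniq)
--         while lo < hi:
--             mid = (lo + hi) // 2
--             if uniq[mid] < v:
--                 lo = mid + 1
--             else:
--                 hi = mid
--         pred[i] = lo
--     return pred
-- ===== Notes on version B (the rewrite author's own statement) =====
-- stated objective: alternative
-- what changed: Replaces set()+sorted+enumerate-built mapping dict by sorting the whole list, compressing adjacent duplicates, and binary-searching each element's rank in the compressed list, with no set or dict.
import Mathlib
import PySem

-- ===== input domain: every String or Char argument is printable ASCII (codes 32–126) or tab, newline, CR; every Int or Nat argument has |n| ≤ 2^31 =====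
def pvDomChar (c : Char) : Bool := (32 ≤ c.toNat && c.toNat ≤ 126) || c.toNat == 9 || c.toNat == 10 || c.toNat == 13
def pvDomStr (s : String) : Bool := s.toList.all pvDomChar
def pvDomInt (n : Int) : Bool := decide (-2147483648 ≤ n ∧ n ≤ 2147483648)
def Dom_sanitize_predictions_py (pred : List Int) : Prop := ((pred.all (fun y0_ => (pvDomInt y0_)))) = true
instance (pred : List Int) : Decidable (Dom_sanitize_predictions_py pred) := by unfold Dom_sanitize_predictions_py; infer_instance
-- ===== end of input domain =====

-- B replaces A's set()+sorted+mapping-dict relabelling by sort + adjacent-duplicate compression +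
-- per-element binary search (same return value; in Python both A and B also mutate pred in place —
-- the theorem is about the return value).


-- ===== PORT A =====
-- matching[pred[i]] never raises (every element of pred is a key of matching), so getD _ 0 is exact here;
-- the write-back loop reads only the not-yet-overwritten pred[i], so it is the map below.
def sanitize_predictions_py (pred : List Int) : List Int :=
  let original_pred_labels := PySem.List.sorted (PySem.Set.ofList pred) (fun x => x) false
  let matching := (PySem.List.enumerate original_pred_labels 0).foldl
      (fun d p => d.insert p.2 p.1) (PySem.Dict.empty : PySem.Dict Int Int)
  pred.map (fun x => matching.getD x 0)

-- ===== PORT B =====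
-- Source B's while-loop binary search; uniq[mid] is in range whenever lo < hi ≤ len(uniq), so pyGetD _ 0 is exact.
def blSearch (u : List Int) (v : Int) (lo hi : Int) : Int :=
  if h : lo < hi then
    let mid := PySem.Int.floordiv (lo + hi) 2
    if PySem.List.pyGetD u mid 0 < v then blSearch u v (mid + 1) hi else blSearch u v lo mid
  else lo
termination_by (hi - lo).toNat
decreasing_by
  · have hb := PySem.Int.floordiv_two_mid_bounds (lo := lo) (hi := hi) (le_of_lt h)
    omega
  · have hb := PySem.Int.floordiv_two_mid_bounds (lo := lo) (hi := hi) (le_of_lt h)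
    have : PySem.Int.floordiv (lo + hi) 2 < hi := by
      rw [PySem.Int.floordiv_lt_iff_lt_mul (by omega)]
      omega
    omega

-- 'if not uniq or uniq[-1] != x: uniq.append(x)' is the fold step ('not uniq' short-circuits, so
-- uniq[-1] is only reached on a nonempty list, where pyGetD _ 0 is exact).
def sanitize_predictions_py_alt (pred : List Int) : List Int :=
  let labels := PySem.List.sorted pred (fun x => x) false
  let uniq := labels.foldl
      (fun u x => if u.isEmpty || !(PySem.List.pyGetD u (-1) 0 == x) then u ++ [x] else u) []
  pred.map (fun v => blSearch uniq v 0 (PySem.List.len uniq))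

-- ===== PRECONDITION & SPEC =====
def Spec_sanitize_predictions_py (pred : List Int) (out : List Int) : Prop := out = sanitize_predictions_py_alt pred
instance (pred : List Int) (out : List Int) : Decidable (Spec_sanitize_predictions_py pred out) := by unfold Spec_sanitize_predictions_py; infer_instance

-- ===== CLAIM (what is proved, stated in full; the proofs are below) =====
def Claim_equal_sanitize_predictions_py : Prop := ∀ (pred : List Int), Dom_sanitize_predictions_py pred → Spec_sanitize_predictions_py pred (sanitize_predictions_py pred)

-- ===== LEMMAS AND PROOFS =====

-- In a strictly increasing list, the number of elements below s[k] is k.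
lemma countP_lt_of_pairwise (s : List Int) (hp : s.Pairwise (· < ·)) (k : Nat) (hk : k < s.length) :
    s.countP (fun u => decide (u < s[k])) = k := by
  induction s generalizing k with
  | nil => simp at hk
  | cons a t ih =>
    rcases List.pairwise_cons.mp hp with ⟨ha, ht⟩
    cases k with
    | zero =>
      simp only [List.getElem_cons_zero]
      rw [List.countP_eq_zero]
      intro u hu
      simp only [decide_eq_true_eq]
      rcases List.mem_cons.mp hu with h | h
      · exact h ▸ lt_irrefl a
      · exact not_lt.mpr (le_of_lt (ha u h))
    | succ n =>
      have hn : n < t.length := by simpa using hk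
      simp only [List.getElem_cons_succ, List.countP_cons]
      have h2 : a < t[n] := ha _ (List.getElem_mem hn)
      simp [h2]
      exact ih ht n hn

-- A's matching dict, built from enumerate over a Nodup list, maps s[k] to k.
lemma getD_fold_enum (s : List Int) (hnd : s.Nodup) (k : Nat) (hk : k < s.length) :
    ((PySem.List.enumerate s 0).foldl (fun d p => d.insert p.2 p.1)
      (PySem.Dict.empty : PySem.Dict Int Int)).getD s[k] 0 = (k : Int) := by
  have hitems := PySem.Dict.items_foldl_insert_fresh (l := PySem.List.enumerate s 0)
      (k := fun p => p.2) (v := fun p => p.1) (d := (PySem.Dict.empty : PySem.Dict Int Int))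
      (by intro a _; simp) (by rw [PySem.List.map_snd_enumerate]; exact hnd)
  have hmem : ((s[k] : Int), (k : Int)) ∈ ((PySem.List.enumerate s 0).map (fun p => (p.2, p.1))) := by
    refine List.mem_map.mpr ⟨((k : Int), s[k]), ?_, rfl⟩
    have h2 := PySem.List.getElem_enumerate (xs := s) (s := 0) (k := k) (h := by simpa using hk)
    simp only [zero_add] at h2
    rw [← h2]
    exact List.getElem_mem _
  have hkeys : (((PySem.List.enumerate s 0).foldl (fun d p => d.insert p.2 p.1)
      (PySem.Dict.empty : PySem.Dict Int Int))).keys.Nodup := by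
    apply PySem.Dict.nodup_keys_foldl_insert_key
    exact PySem.Dict.nodup_keys_empty
  apply PySem.Dict.getD_of_mem_items
  · rw [hitems]; exact List.mem_append_right _ hmem
  · exact hkeys

-- countP counts k when the predicate holds exactly on the first k positions.
lemma countP_eq_of_split (u : List Int) (p : Int → Bool) (k : Nat) (hk : k ≤ u.length)
    (h1 : ∀ j (hj : j < k) (hj2 : j < u.length), p u[j])
    (h2 : ∀ j (hj : k ≤ j) (hj2 : j < u.length), ¬ p u[j]) :
    u.countP p = k := by
  conv_lhs => rw [← List.take_append_drop k u]
  rw [List.countP_append]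
  have ht : (u.take k).countP p = k := by
    rw [List.countP_eq_length.mpr, List.length_take_of_le hk]
    intro a ha
    rcases List.mem_iff_getElem.mp ha with ⟨j, hj, rfl⟩
    have hjk : j < k := lt_of_lt_of_le hj (by simp [List.length_take])
    rw [List.getElem_take]
    exact h1 j hjk (by simp at hj; omega)
  have hd : (u.drop k).countP p = 0 := by
    rw [List.countP_eq_zero]
    intro a ha
    rcases List.mem_iff_getElem.mp ha with ⟨j, hj, rfl⟩
    rw [List.getElem_drop]
    exact h2 (k + j) (by omega) (by simp at hj; omega)
  omega

-- B's binary search on a (weakly) sorted list returns the number of elements below x.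
lemma blSearch_spec (u : List Int) (hmono : ∀ i j (hij : i ≤ j) (hj : j < u.length), u[i]'(by omega) ≤ u[j])
    (x : Int) (lo hi : Int) (hlo : 0 ≤ lo) (hlh : lo ≤ hi) (hhiL : hi ≤ u.length)
    (h1 : ∀ j (hj : j < lo.toNat) (hj2 : j < u.length), u[j] < x)
    (h2 : ∀ j (hj : hi.toNat ≤ j) (hj2 : j < u.length), ¬ u[j] < x) :
    blSearch u x lo hi = (u.countP (fun y => decide (y < x)) : Int) := by
  by_cases h : lo < hi
  · have hb := PySem.Int.floordiv_two_mid_bounds (lo := lo) (hi := hi) (le_of_lt h)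
    have hmlt : PySem.Int.floordiv (lo + hi) 2 < hi := by
      rw [PySem.Int.floordiv_lt_iff_lt_mul (by omega)]; omega
    rw [blSearch, dif_pos h]
    show (if PySem.List.pyGetD u (PySem.Int.floordiv (lo + hi) 2) 0 < x then
        blSearch u x (PySem.Int.floordiv (lo + hi) 2 + 1) hi
      else blSearch u x lo (PySem.Int.floordiv (lo + hi) 2)) = _
    set mid := PySem.Int.floordiv (lo + hi) 2 with hmid
    have hmr : mid.toNat < u.length := by omega
    have hget : PySem.List.pyGetD u mid 0 = u[mid.toNat] :=
      PySem.List.pyGetD_eq_getElem (xs := u) (i := mid) (d := 0) (by omega) (by omega)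
    rw [hget]
    by_cases hc : u[mid.toNat] < x
    · rw [if_pos hc]
      apply blSearch_spec u hmono x (mid + 1) hi (by omega) (by omega) hhiL
      · intro j hj hj2
        have : u[j] ≤ u[mid.toNat] := hmono j mid.toNat (by omega) hmr
        omega
      · exact h2
    · rw [if_neg hc]
      apply blSearch_spec u hmono x lo mid (by omega) (by omega) (by omega)
      · exact h1
      · intro j hj hj2
        have : u[mid.toNat] ≤ u[j] := hmono mid.toNat j (by omega) hj2
        omega
  · rw [blSearch, dif_neg h]
    have : lo = hi := le_antisymm hlh (not_lt.mp h)
    subst this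
    have := countP_eq_of_split u (fun y => decide (y < x)) lo.toNat (by omega)
      (by intro j hj hj2; simpa using h1 j hj hj2)
      (by intro j hj hj2; simpa using h2 j hj hj2)
    omega
termination_by (hi - lo).toNat
decreasing_by all_goals omega

-- every element of a strictly increasing list is at most its last element
lemma le_getLast_of_pairwise (acc : List Int) (hp : acc.Pairwise (· < ·)) (h : acc ≠ []) :
    ∀ a ∈ acc, a ≤ acc.getLast h := by
  induction acc with
  | nil => simp
  | cons b t ih =>
    intro a ha
    rcases List.mem_cons.mp ha with rfl | ha'
    · cases t with
      | nil => simp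
      | cons c s =>
        rw [List.getLast_cons (by simp)]
        exact le_of_lt ((List.pairwise_cons.mp hp).1 _ (List.getLast_mem (by simp)))
    · have hne : t ≠ [] := List.ne_nil_of_mem ha'
      rw [List.getLast_cons hne]
      exact ih (List.pairwise_cons.mp hp).2 hne a ha'

-- B's adjacent-duplicate compression of a weakly sorted list is strictly increasing and keeps membership.
lemma dedup_fold (l : List Int) (acc : List Int) (hl : l.Pairwise (· ≤ ·))
    (hacc : acc.Pairwise (· < ·)) (hconn : ∀ a ∈ acc, ∀ y ∈ l, a ≤ y) :
    (l.foldl (fun u x => if u.isEmpty || !(PySem.List.pyGetD u (-1) 0 == x) then u ++ [x] else u) acc).Pairwise (· < ·) ∧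
    (∀ z, z ∈ l.foldl (fun u x => if u.isEmpty || !(PySem.List.pyGetD u (-1) 0 == x) then u ++ [x] else u) acc ↔ z ∈ acc ∨ z ∈ l) := by
  induction l generalizing acc with
  | nil => simp [hacc]
  | cons x t ih =>
    rcases List.pairwise_cons.mp hl with ⟨hx, ht⟩
    simp only [List.foldl_cons]
    by_cases he : acc = []
    · subst he
      simp only [List.isEmpty_nil, Bool.true_or, if_pos, List.nil_append]
      have := ih [x] ht (by simp) (by intro a ha y hy; simp at ha; exact ha ▸ hx y hy)
      refine ⟨this.1, fun z => ?_⟩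
      rw [(this.2 z)]
      simp
    · have hget : PySem.List.pyGetD acc (-1) 0 = acc.getLast he := PySem.List.pyGetD_neg_one acc 0 he
      by_cases hLx : acc.getLast he = x
      · have hcond : (acc.isEmpty || !(PySem.List.pyGetD acc (-1) 0 == x)) = false := by
          simp [hget, hLx, he]
        rw [hcond, if_neg (by simp)]
        have := ih acc ht hacc (by intro a ha y hy; exact hconn a ha y (List.mem_cons_of_mem x hy))
        refine ⟨this.1, fun z => ?_⟩
        rw [this.2 z]
        constructor
        · rintro (h | h)
          · exact Or.inl h
          · exact Or.inr (List.mem_cons_of_mem x h)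
        · rintro (h | h)
          · exact Or.inl h
          · rcases List.mem_cons.mp h with rfl | h'
            · exact Or.inl (hLx ▸ List.getLast_mem he)
            · exact Or.inr h'
      · have hcond : (acc.isEmpty || !(PySem.List.pyGetD acc (-1) 0 == x)) = true := by
          simp [hget, hLx]
        rw [hcond, if_pos rfl]
        have hLlt : acc.getLast he < x :=
          lt_of_le_of_ne (hconn _ (List.getLast_mem he) x (List.mem_cons_self)) hLx
        have hpair : (acc ++ [x]).Pairwise (· < ·) := by
          rw [List.pairwise_append]
          refine ⟨hacc, by simp, ?_⟩
          intro a ha b hb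
          simp at hb
          subst hb
          exact lt_of_le_of_lt (le_getLast_of_pairwise acc hacc he a ha) hLlt
        have hconn' : ∀ a ∈ acc ++ [x], ∀ y ∈ t, a ≤ y := by
          intro a ha y hy
          rcases List.mem_append.mp ha with h' | h'
          · exact hconn a h' y (List.mem_cons_of_mem x hy)
          · simp at h'; exact h' ▸ hx y hy
        have := ih (acc ++ [x]) ht hpair hconn'
        refine ⟨this.1, fun z => ?_⟩
        rw [this.2 z]
        simp only [List.mem_append, List.mem_cons]
        tauto

-- ===== VERDICT (by name: the statement is the Claim_ definition above) =====
theorem sanitize_predictions_py_spec : Claim_equal_sanitize_predictions_py := by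
  intro pred _
  unfold Spec_sanitize_predictions_py sanitize_predictions_py sanitize_predictions_py_alt
  apply List.map_congr_left
  intro x hx
  -- A's sorted unique labels
  set s := PySem.List.sorted (PySem.Set.ofList pred) (fun x => x) false with hs
  have hp : s.Pairwise (· < ·) := PySem.List.sorted_ofList_pairwise_lt pred
  have hnd : s.Nodup := hp.imp (fun h => ne_of_lt h)
  -- B's compressed sorted list equals s
  set labels := PySem.List.sorted pred (fun x => x) false with hlabels
  have hlp : labels.Pairwise (· ≤ ·) := PySem.List.sorted_pairwise pred (fun x => x) 
  set uniq := labels.foldl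
      (fun u x => if u.isEmpty || !(PySem.List.pyGetD u (-1) 0 == x) then u ++ [x] else u) [] with huniq
  have hdf := dedup_fold labels [] hlp (by simp) (by simp)
  have hupair : uniq.Pairwise (· < ·) := hdf.1
  have humem : ∀ z, z ∈ uniq ↔ z ∈ pred := by
    intro z
    rw [huniq, hdf.2 z, hlabels, PySem.List.mem_sorted]
    simp
  have hund : uniq.Nodup := hupair.imp (fun h => ne_of_lt h)
  have hseq : s = uniq := by
    apply PySem.List.sorted_eq_of_perm_of_pairwise_lt
    · rw [List.perm_ext_iff_of_nodup hund (PySem.Set.nodup_ofList pred)]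
      intro a
      rw [humem a, PySem.Set.mem_ofList]
    · exact hupair
  -- the common value: the number of (distinct) labels below x
  have hxs : x ∈ s := by
    rw [hs, PySem.List.mem_sorted]
    exact (PySem.Set.mem_ofList pred x).mpr hx
  rcases List.mem_iff_getElem.mp hxs with ⟨k, hk, hsk⟩
  have hA : ((PySem.List.enumerate s 0).foldl (fun d p => d.insert p.2 p.1)
      (PySem.Dict.empty : PySem.Dict Int Int)).getD x 0 = ((s.countP (fun y => decide (y < x)) : Nat) : Int) := by
    rw [← hsk, getD_fold_enum s hnd k hk, countP_lt_of_pairwise s hp k hk]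
  have hmono : ∀ i j (hij : i ≤ j) (hj : j < uniq.length), uniq[i]'(by omega) ≤ uniq[j] := by
    intro i j hij hj
    rcases eq_or_lt_of_le hij with rfl | hlt
    · exact le_refl _
    · exact le_of_lt ((List.pairwise_iff_getElem.mp hupair) i j (by omega) hj hlt)
  have hB : blSearch uniq x 0 (PySem.List.len uniq) = ((uniq.countP (fun y => decide (y < x)) : Nat) : Int) := by
    apply blSearch_spec uniq hmono x 0 (PySem.List.len uniq) (by omega)
      (by simp [PySem.List.len_eq]) (by simp [PySem.List.len_eq])
    · intro j hj hj2; omega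
    · intro j hj hj2
      rw [PySem.List.len_eq] at hj
      omega
  rw [hA, hB, hseq]
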